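-- pv_equiv track=rewrite | github.com/darki73/sylvan | src/sylvan/indexing/pipeline/import_resolver.py | _go_candidates
-- ===== SOURCE A (Python) =====
-- _GO_STDLIB = frozenset(
--     {
--         "archive",
--         "bufio",
--         "builtin",
--         "bytes",
--         "cmp",
--         "compress",
--         "container",
--         "context",
--         "crypto",
--         "database",
--         "debug",
--         "embed",
--         "encoding",
--         "errors",
--         "expvar",
--         "flag",
--         "fmt",
--         "go",
--         "hash",
--         "html",
--         "image",
--         "index",
--         "io",
--         "iter",
--         "log",
--         "maps",
--         "math",
--         "mime",
--         "net",
--         "os",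
--         "path",
--         "plugin",
--         "reflect",
--         "regexp",
--         "runtime",
--         "slices",
--         "sort",
--         "strconv",
--         "strings",
--         "structs",
--         "sync",
--         "syscall",
--         "testing",
--         "text",
--         "time",
--         "unicode",
--         "unsafe",
--     }
-- )
--
-- def _go_candidates(specifier: str, source_path: str) -> list[str]:
--     """Generate candidate paths for a Go import specifier.
--
--     Args:
--         specifier: Go import path (e.g. ``github.com/org/repo/pkg``).
--         source_path: Relative path of the importing file.
--
--     Returns:
--         Candidate file paths.
--     """
--     # Skip stdlib (single-segment, no dots).
--     if "/" not in specifier: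
--         return []
--
--     first_segment = specifier.split("/", maxsplit=1)[0]
--     if first_segment in _GO_STDLIB:
--         return []
--
--     # Try matching the last N segments against file directories.
--     parts = specifier.split("/")
--     candidates: list[str] = []
--
--     # Try progressively shorter suffixes.
--     for i in range(len(parts)):
--         suffix = "/".join(parts[i:])
--         candidates.append(suffix)
--
--     return candidates
-- ===== SOURCE B (Python) =====
-- _GO_STDLIB = frozenset(
--     {
--         "archive", "bufio", "builtin", "bytes", "cmp", "compress", "container",
--         "context", "crypto", "database", "debug", "embed", "encoding", "errors",
--         "expvar", "flag", "fmt", "go", "hash", "html", "image", "index", "io",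
--         "iter", "log", "maps", "math", "mime", "net", "os", "path", "plugin",
--         "reflect", "regexp", "runtime", "slices", "sort", "strconv", "strings",
--         "structs", "sync", "syscall", "testing", "text", "time", "unicode",
--         "unsafe",
--     }
-- )
--
--
-- def _go_candidates(specifier: str, source_path: str) -> list[str]:
--     """Generate candidate paths for a Go import specifier.
--
--     Same guards as the original; the suffix list is produced by a single
--     incremental left-stripping pass instead of re-joining parts[i:] per index.
--     """
--     if "/" not in specifier:
--         return []
--
--     first_segment = specifier.split("/", maxsplit=1)[0]
--     if first_segment in _GO_STDLIB:
--         return []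
--
--     candidates: list[str] = []
--     rest = specifier
--     while True:
--         candidates.append(rest)
--         if "/" not in rest:
--             break
--         rest = rest.split("/", 1)[1]
--     return candidates
-- ===== Notes on version B (the rewrite author's own statement) =====
-- stated objective: alternative
-- what changed: The index-based loop that re-splits the specifier into parts and re-joins parts[i:] for every i is replaced by a single incremental left-stripping pass (append rest, then drop everything up to and including the first '/'), keeping the two early-return guards.
import Mathlib
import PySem

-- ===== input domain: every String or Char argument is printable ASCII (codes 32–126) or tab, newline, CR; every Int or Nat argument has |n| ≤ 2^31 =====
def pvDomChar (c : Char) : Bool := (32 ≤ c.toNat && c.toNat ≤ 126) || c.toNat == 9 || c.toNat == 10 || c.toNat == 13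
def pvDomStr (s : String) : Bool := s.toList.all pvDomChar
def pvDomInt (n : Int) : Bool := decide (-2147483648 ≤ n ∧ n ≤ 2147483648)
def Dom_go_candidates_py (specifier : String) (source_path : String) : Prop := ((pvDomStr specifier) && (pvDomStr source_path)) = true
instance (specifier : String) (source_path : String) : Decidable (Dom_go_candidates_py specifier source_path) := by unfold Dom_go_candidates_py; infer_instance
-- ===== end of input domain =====

-- B replaces A's index loop (re-joining parts[i:] for every i) by one incremental
-- left-stripping pass over the specifier; the two early-return guards are unchanged (objective: alternative).

-- ===== PORT A =====

-- the module constant _GO_STDLIB (a frozenset of strings)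
def goStdlib : PySem.Set String := PySem.Set.ofList
  ["archive", "bufio", "builtin", "bytes", "cmp", "compress", "container",
   "context", "crypto", "database", "debug", "embed", "encoding", "errors",
   "expvar", "flag", "fmt", "go", "hash", "html", "image", "index", "io",
   "iter", "log", "maps", "math", "mime", "net", "os", "path", "plugin",
   "reflect", "regexp", "runtime", "slices", "sort", "strconv", "strings",
   "structs", "sync", "syscall", "testing", "text", "time", "unicode",
   "unsafe"]

def go_candidates_py (specifier : String) (source_path : String) : List String :=
  -- if "/" not in specifier: return []
  if ¬ (PySem.Str.isIn "/" specifier = true) then []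
  -- first_segment = specifier.split("/", maxsplit=1)[0]   (split never returns [], so [0] is total)
  else if goStdlib.contains (PySem.List.pyGetD ((PySem.Str.splitMax? specifier "/" 1).getD []) 0 "") then []
  else
    -- parts = specifier.split("/");  for i in range(len(parts)): candidates.append("/".join(parts[i:]))
    (PySem.List.pyRange 0 (PySem.List.len ((PySem.Str.split? specifier "/").getD [])) 1).foldl
      (fun acc i => acc ++ [PySem.Str.join "/" (PySem.List.slice ((PySem.Str.split? specifier "/").getD []) (some i))]) []

-- ===== PORT B =====

-- termination fact for B's while loop: stripping through the first '/' shortens the string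
theorem pvStripLenLt (cs : List Char) (h : '/' ∈ cs) :
    ((cs.dropWhile (· ≠ '/')).tail).length < cs.length := by
  have hne : cs.dropWhile (· ≠ '/') ≠ [] := by
    intro hnil
    have := List.dropWhile_eq_nil_iff.mp hnil '/' h
    simp at this
  have h1 : (cs.dropWhile (· ≠ '/')).length ≤ cs.length := List.length_dropWhile_le _ _
  cases hd : cs.dropWhile (· ≠ '/') with
  | nil => exact absurd hd hne
  | cons x xs => rw [hd] at h1; simp at h1 ⊢; omega

theorem pvIsInSlashIff (cs : List Char) : PySem.Chars.isIn ['/'] cs = true ↔ '/' ∈ cs := by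
  rw [PySem.Chars.isIn_iff_infix]
  constructor
  · intro h; exact List.singleton_sublist.mp h.sublist
  · intro h; obtain ⟨s, t, rfl⟩ := List.append_of_mem h; exact ⟨s, t, by simp⟩

-- B's while loop:  candidates.append(rest); if "/" not in rest: break; rest = rest.split("/", 1)[1]
-- (exact: with "/" in rest, rest.split("/", 1)[1] is everything after the first '/',
--  i.e. (rest.dropWhile (· ≠ '/')).tail)
def goAltStrip (cs : List Char) : List String :=
  if h : PySem.Chars.isIn ['/'] cs = true then
    String.ofList cs :: goAltStrip ((cs.dropWhile (· ≠ '/')).tail)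
  else [String.ofList cs]
termination_by cs.length
decreasing_by exact pvStripLenLt cs ((pvIsInSlashIff cs).mp h)

def go_candidates_py_alt (specifier : String) (source_path : String) : List String :=
  if ¬ (PySem.Str.isIn "/" specifier = true) then []
  else if goStdlib.contains (PySem.List.pyGetD ((PySem.Str.splitMax? specifier "/" 1).getD []) 0 "") then []
  else goAltStrip specifier.toList

-- ===== PRECONDITION & SPEC =====
def Spec_go_candidates_py (specifier : String) (source_path : String) (out : List String) : Prop := out = go_candidates_py_alt specifier source_path
instance (specifier : String) (source_path : String) (out : List String) : Decidable (Spec_go_candidates_py specifier source_path out) := by unfold Spec_go_candidates_py; infer_instance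

-- ===== CLAIM (what is proved, stated in full; the proofs are below) =====
def Claim_equal_go_candidates_py : Prop := ∀ (specifier : String) (source_path : String), Dom_go_candidates_py specifier source_path → Spec_go_candidates_py specifier source_path (go_candidates_py specifier source_path)

-- ===== LEMMAS AND PROOFS =====

-- reference splitter for a single-char separator: csplit cs = (head piece, remaining pieces)
def csplit : List Char → List Char × List (List Char)
  | [] => ([], [])
  | c :: cs =>
    let r := csplit cs
    if c = '/' then ([], r.1 :: r.2) else (c :: r.1, r.2)

-- the suffix sequence B's loop walks, at the character level
def sufChars (cs : List Char) : List (List Char) :=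
  if h : '/' ∈ cs then cs :: sufChars ((cs.dropWhile (· ≠ '/')).tail) else [cs]
termination_by cs.length
decreasing_by exact pvStripLenLt cs h

theorem splitOn_go_eq (cs : List Char) : ∀ (fuel : Nat) (cur : List Char) (acc : List (List Char)),
    cs.length < fuel →
    PySem.Chars.splitOn.go ['/'] fuel cs cur acc =
      acc.reverse ++ (cur.reverse ++ (csplit cs).1) :: (csplit cs).2 := by
  induction cs with
  | nil =>
    intro fuel cur acc hf
    cases fuel with
    | zero => omega
    | succ f => simp [PySem.Chars.splitOn.go, csplit]
  | cons c rest ih =>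
    intro fuel cur acc hf
    cases fuel with
    | zero => simp at hf
    | succ f =>
      by_cases hc : c = '/'
      · subst hc
        rw [show PySem.Chars.splitOn.go ['/'] (f+1) ('/'::rest) cur acc
              = PySem.Chars.splitOn.go ['/'] f rest [] (cur.reverse :: acc) by
            simp [PySem.Chars.splitOn.go]]
        rw [ih f [] (cur.reverse :: acc) (by simp at hf; omega)]
        simp [csplit]
      · rw [show PySem.Chars.splitOn.go ['/'] (f+1) (c::rest) cur acc
              = PySem.Chars.splitOn.go ['/'] f rest (c :: cur) acc by
            simp [PySem.Chars.splitOn.go, List.isPrefixOf]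
            intro h; exact absurd h.symm hc]
        rw [ih f (c :: cur) acc (by simp at hf; omega)]
        simp [csplit, hc]

theorem splitOn_eq_csplit (cs : List Char) :
    PySem.Chars.splitOn cs ['/'] = (csplit cs).1 :: (csplit cs).2 := by
  have := splitOn_go_eq cs (cs.length + 1) [] [] (by omega)
  simpa [PySem.Chars.splitOn] using this

theorem join_csplit (cs : List Char) :
    PySem.Chars.join ['/'] ((csplit cs).1 :: (csplit cs).2) = cs := by
  induction cs with
  | nil => simp [csplit, PySem.Chars.join_singleton]
  | cons c rest ih =>
    by_cases hc : c = '/'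
    · subst hc
      rw [show csplit ('/' :: rest) = ([], (csplit rest).1 :: (csplit rest).2) from by
        simp [csplit]]
      rw [PySem.Chars.join_cons_cons]
      simp [ih]
    · simp only [csplit]
      rw [if_neg hc]
      cases h2 : (csplit rest).2 with
      | nil =>
        rw [h2] at ih
        rw [PySem.Chars.join_singleton] at ih ⊢
        simp [ih]
      | cons y ys =>
        rw [h2] at ih
        rw [PySem.Chars.join_cons_cons] at ih ⊢
        simp at ih ⊢
        simp [ih]

theorem csplit_of_not_mem (cs : List Char) (h : '/' ∉ cs) :
    csplit cs = (cs, []) := by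
  induction cs with
  | nil => simp [csplit]
  | cons c rest ih =>
    simp at h
    have hc : ¬ c = '/' := fun hh => h.1 hh.symm
    simp [csplit, hc, ih h.2]

theorem csplit_of_mem (cs : List Char) (h : '/' ∈ cs) :
    (csplit cs).1 = cs.takeWhile (· ≠ '/') ∧
    (csplit cs).2 = (csplit ((cs.dropWhile (· ≠ '/')).tail)).1
                      :: (csplit ((cs.dropWhile (· ≠ '/')).tail)).2 := by
  induction cs with
  | nil => simp at h
  | cons c rest ih =>
    by_cases hc : c = '/'
    · subst hc
      constructor
      · simp [csplit, List.takeWhile]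
      · simp [csplit, List.dropWhile]
    · have hr : '/' ∈ rest := by
        rcases List.mem_cons.mp h with h1 | h1
        · exact absurd h1.symm hc
        · exact h1
      obtain ⟨ih1, ih2⟩ := ih hr
      constructor
      · simp [csplit, hc, List.takeWhile, ih1]
      · simp only [csplit, List.dropWhile]
        rw [if_neg hc]
        simpa [hc] using ih2

-- A's map of joins of suffixes of the split equals the suffix sequence, at char level
theorem map_join_eq_sufChars : ∀ (n : Nat) (cs : List Char), cs.length ≤ n →
    (List.range ((csplit cs).2.length + 1)).map
      (fun k => PySem.Chars.join ['/'] (((csplit cs).1 :: (csplit cs).2).drop k))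
    = sufChars cs := by
  intro n
  induction n with
  | zero =>
    intro cs hn
    have : cs = [] := List.eq_nil_of_length_eq_zero (by omega)
    subst this
    simp [csplit, sufChars, PySem.Chars.join_singleton]
  | succ m ih =>
    intro cs hn
    by_cases h : '/' ∈ cs
    · obtain ⟨h1, h2⟩ := csplit_of_mem cs h
      set st := (cs.dropWhile (· ≠ '/')).tail with hst
      have hlt : st.length < cs.length := pvStripLenLt cs h
      rw [sufChars, dif_pos h]
      rw [h2]
      rw [show ((csplit st).1 :: (csplit st).2).length = (csplit st).2.length + 1 by simp]
      rw [List.range_succ_eq_map, List.map_cons, List.map_map]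
      congr 1
      · simpa [h2] using join_csplit cs
      · have := ih st (by omega)
        rw [← this]
        apply List.map_congr_left
        intro k _
        simp [List.drop]
    · rw [sufChars, dif_neg h]
      rw [csplit_of_not_mem cs h]
      simp [PySem.Chars.join_singleton]

theorem goAltStrip_eq_map_sufChars : ∀ (n : Nat) (cs : List Char), cs.length ≤ n →
    goAltStrip cs = (sufChars cs).map String.ofList := by
  intro n
  induction n with
  | zero =>
    intro cs hn
    have : cs = [] := List.eq_nil_of_length_eq_zero (by omega)
    subst this
    rw [goAltStrip, sufChars]
    simp [pvIsInSlashIff]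
  | succ m ih =>
    intro cs hn
    rw [goAltStrip, sufChars]
    by_cases h : '/' ∈ cs
    · rw [dif_pos ((pvIsInSlashIff cs).mpr h), dif_pos h]
      have hlt := pvStripLenLt cs h
      rw [ih _ (by omega)]
      simp
    · rw [dif_neg (by simpa [pvIsInSlashIff] using h), dif_neg h]
      simp

-- the two loop bodies agree (no condition on the specifier needed)
theorem bodyA_eq_goAltStrip (s : String) :
    (PySem.List.pyRange 0 (PySem.List.len ((PySem.Str.split? s "/").getD [])) 1).foldl
      (fun acc i => acc ++ [PySem.Str.join "/" (PySem.List.slice ((PySem.Str.split? s "/").getD []) (some i))]) []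
    = goAltStrip s.toList := by
  set cs := s.toList with hcs
  have hparts : (PySem.Str.split? s "/").getD []
      = ((csplit cs).1 :: (csplit cs).2).map String.ofList := by
    simp [PySem.Str.split?, PySem.Chars.split?, splitOn_eq_csplit, ← hcs]
  rw [hparts]
  rw [PySem.List.len_eq]
  rw [show (((csplit cs).1 :: (csplit cs).2).map String.ofList).length
        = (csplit cs).2.length + 1 by simp]
  rw [PySem.List.pyRange_zero_natCast]
  rw [PySem.List.foldl_append_singleton_eq_map]
  rw [List.map_map, List.nil_append]
  rw [goAltStrip_eq_map_sufChars cs.length cs (le_refl _)]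
  rw [← map_join_eq_sufChars cs.length cs (le_refl _), List.map_map]
  apply List.map_congr_left
  intro k _
  simp only [Function.comp]
  rw [PySem.List.slice_from _ (by exact_mod_cast Int.natCast_nonneg k)]
  rw [Int.toNat_natCast, ← List.map_drop]
  simp [PySem.Str.join, PySem.Chars.join, Function.comp_def]

-- ===== VERDICT (by name: the statement is the Claim_ definition above) =====
theorem go_candidates_py_spec : Claim_equal_go_candidates_py := by
  intro specifier source_path _
  unfold Spec_go_candidates_py go_candidates_py go_candidates_py_alt
  by_cases h1 : PySem.Str.isIn "/" specifier = true
  · rw [if_neg (not_not_intro h1), if_neg (not_not_intro h1)]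
    by_cases h2 : goStdlib.contains
        (PySem.List.pyGetD ((PySem.Str.splitMax? specifier "/" 1).getD []) 0 "") = true
    · rw [if_pos h2, if_pos h2]
    · rw [if_neg h2, if_neg h2]
      exact bodyA_eq_goAltStrip specifier
  · rw [if_pos h1, if_pos h1]
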